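-- pv_equiv track=rewrite | github.com/PawelMasior/lang-playground | apps/api/src/interview_ai/agents/nodes/interview_nodes.py | _extract_list_section
-- ===== SOURCE A (Python) =====
-- def _extract_list_section(lines: list[str], section: str) -> list[str]:
--     capture = False
--     values: list[str] = []
--     for line in lines:
--         marker = line.strip().upper()
--         if marker.startswith(f"{section}:"):
--             capture = True
--             continue
--         if capture and marker.endswith(":") and marker[:-1] in {"ANSWER", "FOLLOW_UP", "EXERCISES"}:
--             break
--         if capture and line.strip().startswith("-"):
--             values.append(line.strip().lstrip("-").strip())
--     return values
-- ===== SOURCE B (Python) =====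
-- def _extract_list_section(lines: list[str], section: str) -> list[str]:
--     header = section + ":"
--     STOPS = {"ANSWER:", "FOLLOW_UP:", "EXERCISES:"}
--     # stage 1: strip/upper every line once
--     marked = [(ln.strip(), ln.strip().upper()) for ln in lines]
--     # stage 2: boolean flag list for header lines; first True gives the start
--     hdr_flags = [m.startswith(header) for _, m in marked]
--     if True not in hdr_flags:
--         return []
--     tail = marked[hdr_flags.index(True) + 1:]
--     # stage 3: boolean flag list for stop lines (a repeated header is never a stop)
--     stop_flags = [(m in STOPS) and not m.startswith(header) for _, m in tail]
--     body = tail[:stop_flags.index(True)] if True in stop_flags else tail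
--     # stage 4: keep dash lines (repeated headers are skipped), clean each
--     return [s.lstrip("-").strip() for s, m in body if s.startswith("-") and not m.startswith(header)]
-- ===== Notes on version B (the rewrite author's own statement) =====
-- stated objective: alternative
-- what changed: Replaced A's single flag-carrying loop (capture flag, continue/break/append per line) by a four-stage pipeline over whole lists: precompute (strip, upper) pairs, build a boolean header-flag list and cut at its first True via list.index, build a boolean stop-flag list and slice the body at its first True, then one filter-and-map comprehension cleans the dash lines; no capture flag or break exists anywhere.
import Mathlib
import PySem

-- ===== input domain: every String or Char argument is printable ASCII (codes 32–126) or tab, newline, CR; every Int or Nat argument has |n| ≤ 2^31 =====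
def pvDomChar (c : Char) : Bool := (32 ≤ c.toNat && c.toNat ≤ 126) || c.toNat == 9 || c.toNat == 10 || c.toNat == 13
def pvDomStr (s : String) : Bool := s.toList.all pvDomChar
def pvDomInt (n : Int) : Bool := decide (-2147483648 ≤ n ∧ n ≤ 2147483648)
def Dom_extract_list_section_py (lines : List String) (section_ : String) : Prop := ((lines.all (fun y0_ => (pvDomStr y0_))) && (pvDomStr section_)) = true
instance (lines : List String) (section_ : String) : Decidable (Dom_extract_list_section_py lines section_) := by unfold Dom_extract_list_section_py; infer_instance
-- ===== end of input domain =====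

-- B replaces A's single capture-flag loop by a staged pipeline: strip/upper all lines, cut at the
-- first header flag with list.index, slice the body at the first stop flag, then filter/map the
-- dash lines (alternative decomposition, same cost).

-- ===== PORT A =====
-- line.strip().upper(), on code points
def pvMarker (line : String) : List Char := PySem.Chars.upper (PySem.Chars.strip line.toList)
-- line.strip().lstrip("-").strip(); lstrip("-") is exactly dropWhile (· == '-') on the code points
def pvItem (line : String) : String :=
  String.ofList (PySem.Chars.strip ((PySem.Chars.strip line.toList).dropWhile (· == '-')))

def pvLoopA (header : List Char) : List String → Bool → List String → List String
  | [], _, values => values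
  | line :: rest, capture, values =>
    let marker := pvMarker line
    if PySem.Chars.startswith marker header then
      pvLoopA header rest true values
    else if capture && PySem.Chars.endswith marker [':'] &&
        decide (PySem.List.slice marker none (some (-1)) ∈
          ["ANSWER".toList, "FOLLOW_UP".toList, "EXERCISES".toList]) then
      values
    else if capture && PySem.Chars.startswith (PySem.Chars.strip line.toList) ['-'] then
      pvLoopA header rest capture (values ++ [pvItem line])
    else
      pvLoopA header rest capture values

def extract_list_section_py (lines : List String) (section_ : String) : List String :=
  pvLoopA (section_.toList ++ [':']) lines false []

-- ===== PORT B =====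
def pvStops : List (List Char) := ["ANSWER:".toList, "FOLLOW_UP:".toList, "EXERCISES:".toList]

-- stage 1: [(ln.strip(), ln.strip().upper()) for ln in lines]
def pvMarked (lines : List String) : List (List Char × List Char) :=
  lines.map (fun ln => (PySem.Chars.strip ln.toList, PySem.Chars.upper (PySem.Chars.strip ln.toList)))

-- stages 3–4 on the tail after the header cut: stop-flag list, slice at its first True, filter/map
def pvPhase2 (header : List Char) (tail : List (List Char × List Char)) : List String :=
  let stopFlags := tail.map (fun p => decide (p.2 ∈ pvStops) && !PySem.Chars.startswith p.2 header)
  let body := match PySem.List.index? stopFlags true with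
    | some e => PySem.List.slice tail none (some (e : Int))  -- tail[:stop_flags.index(True)]
    | none => tail
  (body.filter (fun p => PySem.Chars.startswith p.1 ['-'] && !PySem.Chars.startswith p.2 header)).map
    (fun p => String.ofList (PySem.Chars.strip (p.1.dropWhile (· == '-'))))

def extract_list_section_py_alt (lines : List String) (section_ : String) : List String :=
  let header := section_.toList ++ [':']
  let marked := pvMarked lines
  let hdrFlags := marked.map (fun p => PySem.Chars.startswith p.2 header)
  -- 'if True not in hdr_flags: return []' and the guarded hdr_flags.index(True): index? is none
  -- exactly when True is absent
  match PySem.List.index? hdrFlags true with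
  | none => []
  | some i => pvPhase2 header (PySem.List.slice marked (some ((i : Int) + 1)) none)

-- ===== PRECONDITION & SPEC =====
def Spec_extract_list_section_py (lines : List String) (section_ : String) (out : List String) : Prop := out = extract_list_section_py_alt lines section_
instance (lines : List String) (section_ : String) (out : List String) : Decidable (Spec_extract_list_section_py lines section_ out) := by unfold Spec_extract_list_section_py; infer_instance

-- ===== CLAIM =====
def Claim_equal_extract_list_section_py : Prop := ∀ (lines : List String) (section_ : String), Dom_extract_list_section_py lines section_ → Spec_extract_list_section_py lines section_ (extract_list_section_py lines section_)

-- ===== LEMMAS AND PROOFS =====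

-- A's stop test (endswith ':' and the prefix in the set) is membership in the set of full stop markers
lemma pv_stop_eq (m : List Char) :
    (PySem.Chars.endswith m [':'] &&
      decide (PySem.List.slice m none (some (-1)) ∈
        ["ANSWER".toList, "FOLLOW_UP".toList, "EXERCISES".toList])) =
    decide (m ∈ pvStops) := by
  by_cases h : PySem.Chars.endswith m [':'] = true
  · obtain ⟨p, hp⟩ := (PySem.Chars.endswith_iff m [':']).1 h
    subst hp
    have hA : "ANSWER:".toList = "ANSWER".toList ++ [':'] := by decide
    have hF : "FOLLOW_UP:".toList = "FOLLOW_UP".toList ++ [':'] := by decide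
    have hE : "EXERCISES:".toList = "EXERCISES".toList ++ [':'] := by decide
    simp only [h, Bool.true_and, PySem.List.slice_to_neg_one, ne_eq, List.cons_ne_self,
      not_false_eq_true, List.dropLast_append_of_ne_nil, List.dropLast_singleton,
      List.append_nil, pvStops, List.mem_cons, List.not_mem_nil, or_false, hA, hF, hE,
      List.append_left_inj]
  · have h' : PySem.Chars.endswith m [':'] = false := by
      cases hb : PySem.Chars.endswith m [':'] <;> simp_all
    rw [h', Bool.false_and]
    symm
    rw [decide_eq_false_iff_not]
    intro hm
    apply h
    rw [PySem.Chars.endswith_iff]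
    fin_cases hm <;> decide

-- unfolding B's stages 3–4 one element at a time
lemma pvPhase2_cons (header : List Char) (p : List Char × List Char)
    (t : List (List Char × List Char)) :
    pvPhase2 header (p :: t) =
      (if (decide (p.2 ∈ pvStops) && !PySem.Chars.startswith p.2 header) = true then []
       else (if (PySem.Chars.startswith p.1 ['-'] && !PySem.Chars.startswith p.2 header) = true
             then [String.ofList (PySem.Chars.strip (p.1.dropWhile (· == '-')))] else [])
            ++ pvPhase2 header t) := by
  unfold pvPhase2
  simp only [List.map_cons]
  by_cases hb : (decide (p.2 ∈ pvStops) && !PySem.Chars.startswith p.2 header) = true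
  · rw [hb, if_pos rfl, PySem.List.index?_cons_self]
    have h0 : PySem.List.slice (p :: t) none (some ((0 : Nat) : Int)) = [] := by
      rw [PySem.List.slice_to_natCast]; simp
    rw [show ((0 : Nat) : Int) = (0 : Int) by norm_num] at h0
    simp [h0]
  · have hb' : (decide (p.2 ∈ pvStops) && !PySem.Chars.startswith p.2 header) = false := by
      cases h : (decide (p.2 ∈ pvStops) && !PySem.Chars.startswith p.2 header) <;> simp_all
    rw [hb', if_neg (by simp)]
    rw [PySem.List.index?_cons_of_ne _ (by simp)]
    cases hi : PySem.List.index?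
        (t.map (fun q => decide (q.2 ∈ pvStops) && !PySem.Chars.startswith q.2 header)) true with
    | none =>
      simp only [Option.map_none]
      cases hd : (PySem.Chars.startswith p.1 ['-'] && !PySem.Chars.startswith p.2 header) with
      | true => simp [hd]
      | false => simp [hd]
    | some e =>
      simp only [Option.map_some]
      have hsl : PySem.List.slice (p :: t) none (some ((e + 1 : Nat) : Int)) =
          p :: PySem.List.slice t none (some ((e : Nat) : Int)) := by
        rw [PySem.List.slice_to_natCast, PySem.List.slice_to_natCast, List.take_succ_cons]
      push_cast at hsl ⊢
      rw [hsl]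
      cases hd : (PySem.Chars.startswith p.1 ['-'] && !PySem.Chars.startswith p.2 header) with
      | true => simp [hd]
      | false => simp [hd]

-- once capture is on, A's loop produces exactly B's stages 3–4 on the remaining lines
lemma pv_loopA_true (header : List Char) (lines : List String) :
    ∀ values, pvLoopA header lines true values = values ++ pvPhase2 header (pvMarked lines) := by
  induction lines with
  | nil => intro values; simp [pvLoopA, pvMarked, pvPhase2, PySem.List.index?]
  | cons line rest ih =>
    intro values
    have hmk : pvMarked (line :: rest) =
        (PySem.Chars.strip line.toList, pvMarker line) :: pvMarked rest := by
      simp [pvMarked, pvMarker]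
    rw [hmk, pvPhase2_cons]
    by_cases hh : PySem.Chars.startswith (pvMarker line) header = true
    · simp only [pvLoopA, hh, if_true, Bool.not_true, Bool.and_false]
      simp only [Bool.false_eq_true, if_false]
      simp [ih]
    · have hh' : PySem.Chars.startswith (pvMarker line) header = false := by
        cases hb : PySem.Chars.startswith (pvMarker line) header <;> simp_all
      by_cases hs : (pvMarker line) ∈ pvStops
      · simp only [pvLoopA, hh', Bool.false_eq_true, if_false, Bool.true_and, pv_stop_eq,
          hs, decide_true, if_true, Bool.not_false, Bool.and_true, List.append_nil]
      · have hA : (PySem.Chars.endswith (pvMarker line) [':'] &&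
            decide (PySem.List.slice (pvMarker line) none (some (-1)) ∈
              ["ANSWER".toList, "FOLLOW_UP".toList, "EXERCISES".toList])) = false := by
          rw [pv_stop_eq]; simp [hs]
        simp only [pvLoopA, hh', Bool.false_eq_true, if_false, Bool.true_and, hA,
          Bool.not_false, Bool.and_true, hs, decide_false,
          Bool.false_eq_true, if_false]
        by_cases hd : PySem.Chars.startswith (PySem.Chars.strip line.toList) ['-'] = true
        · simp [hd, ih, pvItem]
        · have hd' : PySem.Chars.startswith (PySem.Chars.strip line.toList) ['-'] = false := by
            cases hb : PySem.Chars.startswith (PySem.Chars.strip line.toList) ['-'] <;> simp_all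
          simp [hd', ih]

-- before the header is found, A skips lines exactly as B's index-cut does
lemma pv_loopA_false (header : List Char) (lines : List String) :
    pvLoopA header lines false [] =
      (match PySem.List.index? ((pvMarked lines).map (fun p => PySem.Chars.startswith p.2 header)) true with
       | none => []
       | some i => pvPhase2 header (PySem.List.slice (pvMarked lines) (some ((i : Int) + 1)) none)) := by
  induction lines with
  | nil => simp [pvLoopA, pvMarked, PySem.List.index?]
  | cons line rest ih =>
    have hmk : pvMarked (line :: rest) =
        (PySem.Chars.strip line.toList, pvMarker line) :: pvMarked rest := by
      simp [pvMarked, pvMarker]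
    rw [hmk]
    simp only [List.map_cons]
    by_cases hh : PySem.Chars.startswith (pvMarker line) header = true
    · rw [hh, PySem.List.index?_cons_self]
      have h1 : PySem.List.slice ((PySem.Chars.strip line.toList, pvMarker line) :: pvMarked rest)
          (some (((0 : Nat) : Int) + 1)) none = pvMarked rest := by
        rw [show (((0 : Nat) : Int) + 1) = ((1 : Nat) : Int) by norm_num,
          PySem.List.slice_from_natCast]
        rfl
      show pvLoopA header (line :: rest) false [] =
        pvPhase2 header (PySem.List.slice
          ((PySem.Chars.strip line.toList, pvMarker line) :: pvMarked rest)
          (some (((0 : Nat) : Int) + 1)) none)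
      rw [h1]
      simp only [pvLoopA, hh, if_true]
      exact pv_loopA_true header rest []
    · have hh' : PySem.Chars.startswith (pvMarker line) header = false := by
        cases hb : PySem.Chars.startswith (pvMarker line) header <;> simp_all
      rw [hh', PySem.List.index?_cons_of_ne _ (by simp)]
      have hlhs : pvLoopA header (line :: rest) false [] = pvLoopA header rest false [] := by
        simp [pvLoopA, hh']
      rw [hlhs, ih]
      cases hi : PySem.List.index?
          ((pvMarked rest).map (fun p => PySem.Chars.startswith p.2 header)) true with
      | none => simp
      | some i =>
        simp only [Option.map_some]
        have h2 : PySem.List.slice ((PySem.Chars.strip line.toList, pvMarker line) :: pvMarked rest)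
            (some (((i + 1 : Nat) : Int) + 1)) none =
            PySem.List.slice (pvMarked rest) (some ((i : Int) + 1)) none := by
          rw [show (((i + 1 : Nat) : Int) + 1) = ((i + 2 : Nat) : Int) by push_cast; ring,
            show ((i : Int) + 1) = ((i + 1 : Nat) : Int) by push_cast; ring,
            PySem.List.slice_from_natCast, PySem.List.slice_from_natCast]
          rfl
        show pvPhase2 header (PySem.List.slice (pvMarked rest) (some ((i : Int) + 1)) none) =
          pvPhase2 header (PySem.List.slice
            ((PySem.Chars.strip line.toList, pvMarker line) :: pvMarked rest)
            (some (((i + 1 : Nat) : Int) + 1)) none)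
        rw [h2]

-- ===== VERDICT =====
theorem extract_list_section_py_spec : Claim_equal_extract_list_section_py := by
  intro lines section_ _
  unfold Spec_extract_list_section_py extract_list_section_py extract_list_section_py_alt
  exact pv_loopA_false _ lines
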